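-- pv_equiv track=rewrite | github.com/pc5401/my_BOJ | 백준/Gold/15703. 주사위 쌓기/주사위 쌓기.py | solve
-- ===== SOURCE A (Python) =====
-- def solve(n: int, dice: list[int]) -> int:
--     dice.sort()
--     towers = []
--
--     for s in dice:
--         candidate_index = -1
--         candidate_height = -1
--
--         for i, h in enumerate(towers):
--             if h <= s and h > candidate_height:
--                 candidate_index = i
--                 candidate_height = h
--         if candidate_index == -1:
--             towers.append(1)
--         else:
--             towers[candidate_index] += 1
--     return len(towers)
-- ===== SOURCE B (Python) =====
-- import bisect
--
--
-- def solve(n: int, dice: list[int]) -> int: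
--     # Ascending sorted multiset of current tower heights.  For each die
--     # (smallest first) a bisect floor-query finds the tallest tower of
--     # height <= s; that tower grows by one, otherwise a new tower of
--     # height 1 starts (it is the minimum, every height is >= 1).
--     heights = []
--     for s in sorted(dice):
--         i = bisect.bisect_right(heights, s)
--         if i == 0:
--             heights.insert(0, 1)
--         else:
--             h = heights.pop(i - 1)
--             bisect.insort_right(heights, h + 1)
--     return len(heights)
-- ===== Notes on version B (the rewrite author's own statement) =====
-- stated objective: faster
-- what changed: A rescans the whole tower list to find the tallest tower of height <= s for every die (quadratic); B keeps the tower heights as a sorted multiset and answers each floor query with bisect_right, popping that height and re-inserting height+1 with insort.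
import Mathlib
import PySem

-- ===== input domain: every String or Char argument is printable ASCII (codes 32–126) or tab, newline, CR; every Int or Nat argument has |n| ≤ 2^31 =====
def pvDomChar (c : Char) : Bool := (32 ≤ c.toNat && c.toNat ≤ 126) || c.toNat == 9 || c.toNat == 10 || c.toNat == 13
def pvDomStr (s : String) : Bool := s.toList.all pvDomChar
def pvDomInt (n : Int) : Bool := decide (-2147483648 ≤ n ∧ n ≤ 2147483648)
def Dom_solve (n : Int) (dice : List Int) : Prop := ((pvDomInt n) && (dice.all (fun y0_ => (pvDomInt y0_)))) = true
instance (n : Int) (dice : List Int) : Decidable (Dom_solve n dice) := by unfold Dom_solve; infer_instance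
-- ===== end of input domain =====

-- B replaces A's quadratic inner argmax scan over the towers by a sorted
-- multiset of tower heights queried with bisect (floor query) — asymptotically
-- fewer comparisons. Equivalence is about the RETURN value; Python A sorts
-- `dice` in place, B does not mutate its argument.

-- ===== PORT A =====
-- inner loop: for i, h in enumerate(towers): if h <= s and h > candidate_height: …
def bestA (towers : List Int) (s : Int) : Int × Int :=
  (PySem.List.enumerate towers 0).foldl
    (fun (c : Int × Int) (ih : Int × Int) =>
      if ih.2 ≤ s ∧ ih.2 > c.2 then (ih.1, ih.2) else c)
    (-1, -1)

-- one iteration of A's outer loop (body of `for s in dice:`)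
def stepA (towers : List Int) (s : Int) : List Int :=
  let c := bestA towers s
  if c.1 = -1 then towers ++ [1]
  else PySem.List.pySetD towers c.1 (PySem.List.pyGetD towers c.1 0 + 1)

def solve (n : Int) (dice : List Int) : Int :=
  let dice := PySem.List.sorted dice (fun x => x) false
  ((dice.foldl stepA []).length : Int)

-- ===== PORT B =====
-- bisect.insort_right(xs, v): insert v at position bisect_right(xs, v)
def insortRight (xs : List Int) (v : Int) : List Int :=
  PySem.List.insert xs ((PySem.List.bisectRight xs v : Nat) : Int) v

-- one iteration of B's loop (body of `for s in sorted(dice):`)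
def stepB (heights : List Int) (s : Int) : List Int :=
  let i := PySem.List.bisectRight heights s
  if i = 0 then 1 :: heights            -- heights.insert(0, 1)
  else
    match PySem.List.pop? heights ((i : Int) - 1) with
    | some (h, rest) => insortRight rest (h + 1)
    | none => heights                   -- unreachable: 1 ≤ i ≤ len(heights)

def solve_alt (n : Int) (dice : List Int) : Int :=
  (((PySem.List.sorted dice (fun x => x) false).foldl stepB []).length : Int)

-- ===== PRECONDITION & SPEC =====
def Spec_solve (n : Int) (dice : List Int) (out : Int) : Prop := out = solve_alt n dice
instance (n : Int) (dice : List Int) (out : Int) : Decidable (Spec_solve n dice out) := by unfold Spec_solve; infer_instance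

-- ===== CLAIM (what is proved, stated in full; the proofs are below) =====
def Claim_equal_solve : Prop := ∀ (n : Int) (dice : List Int), Dom_solve n dice → Spec_solve n dice (solve n dice)

-- ===== LEMMAS AND PROOFS =====

-- invariant tying B's state to A's: same multiset, B's list sorted, all heights ≥ 1
def InvTB (towers heights : List Int) : Prop :=
  heights.Perm towers ∧ heights.Pairwise (· ≤ ·) ∧ ∀ x ∈ heights, 1 ≤ x

-- characterisation of A's inner argmax fold
theorem bestA_go (s : Int) (xs : List Int) (st : Int) (ci ch : Int) :
    (let r := (PySem.List.enumerate xs st).foldl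
        (fun (c : Int × Int) (ih : Int × Int) =>
          if ih.2 ≤ s ∧ ih.2 > c.2 then (ih.1, ih.2) else c) (ci, ch);
      (r = (ci, ch) ∧ ∀ x ∈ xs, x ≤ s → x ≤ ch) ∨
      (∃ (k : Nat) (hk : k < xs.length),
        r = (st + (k : Int), xs[k]) ∧ xs[k] ≤ s ∧ ch < xs[k] ∧
          ∀ y ∈ xs, y ≤ s → y ≤ xs[k])) := by
  induction xs generalizing st ci ch with
  | nil => exact Or.inl ⟨rfl, by simp⟩
  | cons x t IH =>
    simp only [PySem.List.enumerate_cons, List.foldl_cons]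
    by_cases hx : x ≤ s ∧ x > ch
    · rw [if_pos hx]
      rcases IH (st + 1) st x with ⟨hr, hall⟩ | ⟨k, hk, hr, hks, hlt, hmax⟩
      · right
        refine ⟨0, by simp, by simpa using hr, by simpa using hx.1, by simpa using hx.2, ?_⟩
        intro y hy hys
        rcases List.mem_cons.1 hy with rfl | hy
        · simp
        · simpa using hall y hy hys
      · right
        refine ⟨k + 1, by simpa using hk, ?_, by simpa using hks, by simp; omega, ?_⟩
        · rw [hr]; refine Prod.ext (by push_cast; ring) (by simp)
        · intro y hy hys
          rcases List.mem_cons.1 hy with rfl | hy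
          · simp; omega
          · simpa using hmax y hy hys
    · rw [if_neg hx]
      rcases IH (st + 1) ci ch with ⟨hr, hall⟩ | ⟨k, hk, hr, hks, hlt, hmax⟩
      · left
        refine ⟨hr, ?_⟩
        intro y hy hys
        rcases List.mem_cons.1 hy with rfl | hy
        · omega
        · exact hall y hy hys
      · right
        refine ⟨k + 1, by simpa using hk, ?_, by simpa using hks, by simpa using hlt, ?_⟩
        · rw [hr]; refine Prod.ext (by push_cast; ring) (by simp)
        · intro y hy hys
          rcases List.mem_cons.1 hy with rfl | hy
          · simp; omega
          · simpa using hmax y hy hys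

theorem bestA_spec (towers : List Int) (s : Int) :
    (bestA towers s = (-1, -1) ∧ ∀ x ∈ towers, x ≤ s → x ≤ -1) ∨
    (∃ (k : Nat) (hk : k < towers.length),
      bestA towers s = ((k : Int), towers[k]) ∧ towers[k] ≤ s ∧
      ∀ y ∈ towers, y ≤ s → y ≤ towers[k]) := by
  rcases bestA_go s towers 0 (-1) (-1) with ⟨hr, hall⟩ | ⟨k, hk, hr, hks, _, hmax⟩
  · exact Or.inl ⟨hr, hall⟩
  · exact Or.inr ⟨k, hk, by simpa [bestA] using hr, hks, hmax⟩

theorem sorted_getElem_mono (xs : List Int) (h : xs.Pairwise (· ≤ ·))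
    (p q : Nat) (hpq : p ≤ q) (hq : q < xs.length) : xs[p]'(by omega) ≤ xs[q] := by
  rcases Nat.lt_or_eq_of_le hpq with hlt | rfl
  · exact List.pairwise_iff_getElem.1 h p q (by omega) hq hlt
  · exact le_refl _

theorem mem_take_getElem (xs : List Int) (p : Nat) (a : Int) (ha : a ∈ xs.take p) :
    ∃ (j : Nat) (hj : j < xs.length), j < p ∧ xs[j] = a := by
  obtain ⟨k, hk, hval⟩ := List.mem_iff_getElem.1 ha
  have hlen := xs.length_take (i := p)
  refine ⟨k, by omega, by omega, ?_⟩
  rw [← hval, List.getElem_take]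

theorem mem_drop_getElem (xs : List Int) (p : Nat) (b : Int) (hb : b ∈ xs.drop p) :
    ∃ (j : Nat) (hj : j < xs.length), p ≤ j ∧ xs[j] = b := by
  obtain ⟨k, hk, hval⟩ := List.mem_iff_getElem.1 hb
  have hlen := xs.length_drop (i := p)
  refine ⟨p + k, by omega, by omega, ?_⟩
  rw [← hval, List.getElem_drop]

theorem perm_take_cons_drop (xs : List Int) (p : Nat) (v : Int) :
    (xs.take p ++ v :: xs.drop p).Perm (v :: xs) := by
  calc (xs.take p ++ v :: xs.drop p).Perm (v :: (xs.take p ++ xs.drop p)) := List.perm_middle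
    _ = (v :: xs) := by rw [List.take_append_drop]

theorem insortRight_perm (xs : List Int) (v : Int) (h : xs.Pairwise (· ≤ ·)) :
    (insortRight xs v).Perm (v :: xs) := by
  rw [insortRight, PySem.List.insert_natCast xs _ v (PySem.List.bisectRight_spec xs v h).1]
  exact perm_take_cons_drop xs _ v

theorem insortRight_pairwise (xs : List Int) (v : Int) (h : xs.Pairwise (· ≤ ·)) :
    (insortRight xs v).Pairwise (· ≤ ·) := by
  obtain ⟨hle, hbelow, habove⟩ := PySem.List.bisectRight_spec xs v h
  rw [insortRight, PySem.List.insert_natCast xs _ v hle]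
  rw [List.pairwise_append]
  refine ⟨h.sublist (List.take_sublist _ _), ?_, ?_⟩
  · rw [List.pairwise_cons]
    refine ⟨?_, h.sublist (List.drop_sublist _ _)⟩
    intro b hb
    obtain ⟨j, hj, hpj, rfl⟩ := mem_drop_getElem xs _ b hb
    exact le_of_lt (habove j hj hpj)
  · intro a ha b hb
    obtain ⟨j, hj, hjp, rfl⟩ := mem_take_getElem xs _ a ha
    have hav : xs[j] ≤ v := hbelow j hj hjp
    rcases List.mem_cons.1 hb with rfl | hb
    · exact hav
    · obtain ⟨j', hj', hpj', rfl⟩ := mem_drop_getElem xs _ b hb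
      exact le_trans hav (le_of_lt (habove j' hj' hpj'))

theorem eraseIdx_decomp (xs : List Int) (p : Nat) (hp : p < xs.length) :
    xs.Perm (xs[p] :: xs.eraseIdx p) := by
  conv_lhs => rw [← List.take_append_drop p xs, List.drop_eq_getElem_cons hp]
  rw [List.eraseIdx_eq_take_drop_succ]
  exact List.perm_middle

theorem set_perm (xs : List Int) (p : Nat) (hp : p < xs.length) (v : Int) :
    (xs.set p v).Perm (v :: xs.eraseIdx p) := by
  rw [List.set_eq_take_cons_drop v hp, List.eraseIdx_eq_take_drop_succ]
  exact List.perm_middle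

-- the single-step agreement: B's bisect step matches A's scan step up to permutation
theorem step_pres (towers heights : List Int) (s : Int) (h : InvTB towers heights) :
    InvTB (stepA towers s) (stepB heights s) := by
  obtain ⟨hperm, hsort, hone⟩ := h
  obtain ⟨hle, hbelow, habove⟩ := PySem.List.bisectRight_spec heights s hsort
  unfold stepB
  by_cases hi : PySem.List.bisectRight heights s = 0
  · rw [if_pos hi]
    -- all heights exceed s; A appends a new tower of height 1
    have hgt : ∀ x ∈ heights, s < x := by
      intro x hx
      obtain ⟨j, hj, rfl⟩ := List.mem_iff_getElem.1 hx
      exact habove j hj (by omega)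
    have hA : stepA towers s = towers ++ [1] := by
      rcases bestA_spec towers s with ⟨hb, _⟩ | ⟨k, hk, hb, hks, _⟩
      · unfold stepA; rw [hb]; rfl
      · exact absurd hks (not_le.2 (hgt towers[k] (hperm.mem_iff.2 (List.getElem_mem hk))))
    rw [hA]
    refine ⟨(hperm.cons 1).trans (List.perm_append_singleton 1 towers).symm, ?_, ?_⟩
    · exact List.pairwise_cons.2 ⟨fun b hb => hone b hb, hsort⟩
    · intro x hx
      rcases List.mem_cons.1 hx with rfl | hx
      · exact le_refl 1
      · exact hone x hx
  · rw [if_neg hi]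
    set i := PySem.List.bisectRight heights s with hidef
    have hi1 : i - 1 < heights.length := by omega
    have hcast : ((i : Int) - 1) = ((i - 1 : Nat) : Int) := by omega
    rw [hcast, PySem.List.pop?_natCast heights (i - 1) hi1]
    set hgt := heights[i-1] with hhdef
    set rest := heights.eraseIdx (i - 1) with hrdef
    have hHs : hgt ≤ s := hbelow (i - 1) hi1 (by omega)
    have hHone : 1 ≤ hgt := hone _ (List.getElem_mem hi1)
    have hmaxB : ∀ x ∈ heights, x ≤ s → x ≤ hgt := by
      intro x hx hxs
      obtain ⟨j, hj, rfl⟩ := List.mem_iff_getElem.1 hx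
      by_cases hji : j < i
      · exact sorted_getElem_mono heights hsort j (i - 1) (by omega) hi1
      · exact absurd hxs (not_le.2 (habove j hj (by omega)))
    have hrsort : rest.Pairwise (· ≤ ·) := hsort.sublist (List.eraseIdx_sublist heights (i - 1))
    have hHdec : heights.Perm (hgt :: rest) := eraseIdx_decomp heights (i - 1) hi1
    -- A must pick the same maximal height
    rcases bestA_spec towers s with ⟨_, hall⟩ | ⟨k, hk, hb, hks, hmaxA⟩
    · exact absurd (hall hgt (hperm.mem_iff.1 (List.getElem_mem hi1)) hHs) (by omega)
    · have hkeq : towers[k] = hgt := by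
        have h1 : towers[k] ≤ hgt := hmaxB towers[k] (hperm.mem_iff.2 (List.getElem_mem hk)) hks
        have h2 : hgt ≤ towers[k] := hmaxA hgt (hperm.mem_iff.1 (List.getElem_mem hi1)) hHs
        omega
      have hA : stepA towers s = towers.set k (hgt + 1) := by
        unfold stepA
        rw [hb]
        rw [if_neg (by intro hcon; simp at hcon)]
        simp only [PySem.List.pySetD_natCast, PySem.List.pyGetD_natCast]
        rw [List.getD_eq_getElem _ _ hk, hkeq]
      rw [hA]
      have hrestperm : rest.Perm (towers.eraseIdx k) := by
        have h1 : (hgt :: rest).Perm (hgt :: towers.eraseIdx k) :=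
          (hHdec.symm.trans hperm).trans (hkeq ▸ eraseIdx_decomp towers k hk)
        exact h1.cons_inv
      refine ⟨?_, insortRight_pairwise rest (hgt + 1) hrsort, ?_⟩
      · exact (insortRight_perm rest (hgt + 1) hrsort).trans
          ((hrestperm.cons (hgt + 1)).trans (set_perm towers k hk (hgt + 1)).symm)
      · intro x hx
        have hx' := (insortRight_perm rest (hgt + 1) hrsort).mem_iff.1 hx
        rcases List.mem_cons.1 hx' with rfl | hx'
        · omega
        · exact hone x (hHdec.mem_iff.2 (List.mem_cons_of_mem _ hx'))

theorem fold_pres (ds : List Int) (towers heights : List Int) (h : InvTB towers heights) :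
    InvTB (ds.foldl stepA towers) (ds.foldl stepB heights) := by
  induction ds generalizing towers heights with
  | nil => exact h
  | cons d ds IH => exact IH _ _ (step_pres towers heights d h)

-- ===== VERDICT (by name: the statement is the Claim_ definition above) =====
theorem solve_spec : Claim_equal_solve := by
  intro n dice _
  unfold Spec_solve solve solve_alt
  have h := fold_pres (PySem.List.sorted dice (fun x => x) false) [] [] ⟨List.Perm.refl _, by simp, by simp⟩
  exact_mod_cast congrArg _ h.1.length_eq.symm
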